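-- pv_equiv track=rewrite | github.com/liuchengwucn/kataoto | src/decode.py | text2text_list
-- ===== SOURCE A (Python) =====
-- def text2text_list(text, begin='#', sep='<', end='>'):
--     lb = len(begin)
--     ls = len(sep)
--     le = len(end)
--     text_list = []
--     buffer = []
--     state = 0
--
--     def clear_buffer():
--         if len(buffer) != 0:
--             if state == 2:
--                 text_list.extend(''.join(buffer).split())
--             else:
--                 text_list.append(''.join(buffer))
--             buffer.clear()
--     i = 0
--     while i < len(text):
--         if text[i:i+lb] == begin:
--             clear_buffer()
--             state = 1
--             i += lb
--             text_list.append(begin)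
--         elif text[i:i+ls] == sep:
--             clear_buffer()
--             state = 2
--             i += ls
--             text_list.append(sep)
--         elif text[i:i+le] == end:
--             clear_buffer()
--             state = 0
--             i += le
--             text_list.append(end)
--         else:
--             buffer.append(text[i])
--             i += 1
--     clear_buffer()
--     return text_list
-- ===== SOURCE B (Python) =====
-- def _emit(out, split_mode, chunk):
--     if chunk:
--         if split_mode:
--             out.extend(chunk.split())
--         else:
--             out.append(chunk)
--
--
-- def text2text_list(text, begin='#', sep='<', end='>'):
--     # Jump from delimiter to delimiter with str.find instead of scanning char
--     # by char: pick the earliest occurrence of begin/sep/end (begin>sep>end on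
--     # ties), emit the chunk before it per the current mode, then continue.
--     out = []
--     split_mode = False
--     rest = text
--     while True:
--         best = None
--         for d, is_sep in ((begin, False), (sep, True), (end, False)):
--             p = rest.find(d)
--             if p != -1 and (best is None or p < best[0]):
--                 best = (p, d, is_sep)
--         if best is None:
--             _emit(out, split_mode, rest)
--             return out
--         p, d, is_sep = best
--         _emit(out, split_mode, rest[:p])
--         out.append(d)
--         split_mode = is_sep
--         rest = rest[p + len(d):]
-- ===== Notes on version B (the rewrite author's own statement) =====
-- stated objective: faster
-- what changed: Replaces the per-character state-machine scan (slice-compare three delimiters at every index, accumulate a char buffer) by a find-based tokenizer: repeatedly locate the earliest next delimiter occurrence with str.find (begin>sep>end on ties), emit the whole chunk before it according to the mode set by the previous delimiter, and continue on the remainder; no char buffer is maintained.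
-- outside the precondition, e.g. on text2text_list('', '', '<', '>'): A returns [], B does not finish within the time limit
import Mathlib
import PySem

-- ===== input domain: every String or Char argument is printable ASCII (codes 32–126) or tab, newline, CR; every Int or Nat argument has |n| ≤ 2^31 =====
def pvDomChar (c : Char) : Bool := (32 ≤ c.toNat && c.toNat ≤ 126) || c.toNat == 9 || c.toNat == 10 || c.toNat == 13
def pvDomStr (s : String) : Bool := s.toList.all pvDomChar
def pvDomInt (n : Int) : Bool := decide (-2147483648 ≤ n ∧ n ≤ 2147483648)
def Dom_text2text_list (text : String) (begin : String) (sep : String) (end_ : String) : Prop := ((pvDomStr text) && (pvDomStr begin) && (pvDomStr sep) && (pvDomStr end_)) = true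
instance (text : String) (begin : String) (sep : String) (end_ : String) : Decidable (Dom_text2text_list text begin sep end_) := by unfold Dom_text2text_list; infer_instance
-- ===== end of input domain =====

-- B tokenizes by jumping to the earliest delimiter occurrence via str.find instead of
-- A's per-character state-machine scan (measured faster in a timing run).

-- ===== PORT A =====
-- clear_buffer: flush the char buffer into the output, splitting on whitespace in state 2
def pvAclear (state : Nat) (buffer : List Char) (text_list : List String) : List String :=
  if buffer.length ≠ 0 then
    if state = 2 then text_list ++ PySem.Str.split₀ (String.ofList buffer)
    else text_list ++ [String.ofList buffer]
  else text_list

-- the while loop; rest = text[i:], so text[i:i+lb] == begin is rest.take lb.length = lb;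
-- fuel only guards the (excluded) empty-delimiter inputs on which Python loops forever
def pvAloop (lb ls le : List Char) (text_list : List String) (buffer : List Char)
    (state : Nat) (rest : List Char) : Nat → List String
  | 0 => pvAclear state buffer text_list
  | fuel+1 =>
    match rest with
    | [] => pvAclear state buffer text_list
    | c :: rtl =>
      if rest.take lb.length = lb then
        pvAloop lb ls le (pvAclear state buffer text_list ++ [String.ofList lb]) [] 1 (rest.drop lb.length) fuel
      else if rest.take ls.length = ls then
        pvAloop lb ls le (pvAclear state buffer text_list ++ [String.ofList ls]) [] 2 (rest.drop ls.length) fuel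
      else if rest.take le.length = le then
        pvAloop lb ls le (pvAclear state buffer text_list ++ [String.ofList le]) [] 0 (rest.drop le.length) fuel
      else
        pvAloop lb ls le text_list (buffer ++ [c]) state rtl fuel

def text2text_list (text : String) (begin : String) (sep : String) (end_ : String) : List String :=
  pvAloop begin.toList sep.toList end_.toList [] [] 0 text.toList text.toList.length

-- ===== PORT B =====
-- one step of the for-loop choosing the best (earliest, first-listed on ties) delimiter
def pvBstep (rest : List Char) (best : Option (Nat × List Char × Bool)) (d : List Char)
    (flag : Bool) : Option (Nat × List Char × Bool) :=
  let p := PySem.Chars.find rest d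
  if p != -1 && (match best with | none => true | some q => decide (p < (q.1 : Int))) then
    some (p.toNat, d, flag)
  else best

def pvBbest (rest b s e : List Char) : Option (Nat × List Char × Bool) :=
  [(b, false), (s, true), (e, false)].foldl (fun acc ds => pvBstep rest acc ds.1 ds.2) none

-- _emit
def pvBemit (out : List String) (splitMode : Bool) (chunk : List Char) : List String :=
  if chunk.length ≠ 0 then
    if splitMode then out ++ PySem.Str.split₀ (String.ofList chunk)
    else out ++ [String.ofList chunk]
  else out

-- the while True loop; fuel likewise only guards empty-delimiter inputs
def pvBloop (b s e : List Char) (out : List String) (splitMode : Bool) (rest : List Char) :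
    Nat → List String
  | 0 => out
  | fuel+1 =>
    match pvBbest rest b s e with
    | none => pvBemit out splitMode rest
    | some (p, d, flag) =>
      pvBloop b s e (pvBemit out splitMode (rest.take p) ++ [String.ofList d]) flag
        (rest.drop (p + d.length)) fuel

def text2text_list_alt (text : String) (begin : String) (sep : String) (end_ : String) : List String :=
  pvBloop begin.toList sep.toList end_.toList [] false text.toList (text.toList.length + 1)

-- ===== PRECONDITION & SPEC =====
-- Pre_ excludes empty delimiters: there Python A loops forever whenever the scan reaches
-- a position the empty string matches (and B likewise never advances); on the few such
-- inputs where A still returns (e.g. empty text) B diverges, so they must be excluded.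
def Pre_text2text_list (text : String) (begin : String) (sep : String) (end_ : String) : Prop :=
  begin ≠ "" ∧ sep ≠ "" ∧ end_ ≠ ""
instance (text : String) (begin : String) (sep : String) (end_ : String) :
    Decidable (Pre_text2text_list text begin sep end_) := by unfold Pre_text2text_list; infer_instance

def pvWitness_text2text_list : String × String × String × String := ("a#b c<d e>f", "#", "<", ">")

def Spec_text2text_list (text : String) (begin : String) (sep : String) (end_ : String)
    (out : List String) : Prop := out = text2text_list_alt text begin sep end_
instance (text : String) (begin : String) (sep : String) (end_ : String) (out : List String) :
    Decidable (Spec_text2text_list text begin sep end_ out) := by unfold Spec_text2text_list; infer_instance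

-- ===== CLAIM (what is proved, stated in full; the proofs are below) =====
def Claim_equal_text2text_list : Prop := ∀ (text : String) (begin : String) (sep : String) (end_ : String), Dom_text2text_list text begin sep end_ → Pre_text2text_list text begin sep end_ → Spec_text2text_list text begin sep end_ (text2text_list text begin sep end_)

-- ===== LEMMAS AND PROOFS =====

-- a match of some delimiter at the head of rest
def pvMatchAt (lb ls le rest : List Char) : Prop :=
  lb <+: rest ∨ ls <+: rest ∨ le <+: rest

theorem pvBbest_none_iff (rest b s e : List Char) :
    pvBbest rest b s e = none ↔
      PySem.Chars.find rest b = -1 ∧ PySem.Chars.find rest s = -1 ∧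
      PySem.Chars.find rest e = -1 := by
  simp only [pvBbest, List.foldl, pvBstep]
  by_cases hb : PySem.Chars.find rest b = -1 <;>
    by_cases hs : PySem.Chars.find rest s = -1 <;>
      by_cases he : PySem.Chars.find rest e = -1 <;>
        simp [hb, hs, he] <;> split_ifs <;> simp_all

theorem pvBbest_eq (rest b s e : List Char) :
    pvBbest rest b s e =
      (if hb : PySem.Chars.find rest b ≠ -1 then
        if hs : PySem.Chars.find rest s ≠ -1 ∧ PySem.Chars.find rest s < PySem.Chars.find rest b then
          if he : PySem.Chars.find rest e ≠ -1 ∧ PySem.Chars.find rest e < PySem.Chars.find rest s then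
            some ((PySem.Chars.find rest e).toNat, e, false)
          else some ((PySem.Chars.find rest s).toNat, s, true)
        else
          if he : PySem.Chars.find rest e ≠ -1 ∧ PySem.Chars.find rest e < PySem.Chars.find rest b then
            some ((PySem.Chars.find rest e).toNat, e, false)
          else some ((PySem.Chars.find rest b).toNat, b, false)
      else if hs : PySem.Chars.find rest s ≠ -1 then
        if he : PySem.Chars.find rest e ≠ -1 ∧ PySem.Chars.find rest e < PySem.Chars.find rest s then
          some ((PySem.Chars.find rest e).toNat, e, false)
        else some ((PySem.Chars.find rest s).toNat, s, true)
      else if he : PySem.Chars.find rest e ≠ -1 then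
        some ((PySem.Chars.find rest e).toNat, e, false)
      else none) := by
  have nb := PySem.Chars.neg_one_le_find rest b
  have ns := PySem.Chars.neg_one_le_find rest s
  have ne := PySem.Chars.neg_one_le_find rest e
  simp only [pvBbest, List.foldl, pvBstep]
  by_cases hb : PySem.Chars.find rest b = -1 <;>
    by_cases hs : PySem.Chars.find rest s = -1 <;>
      by_cases he : PySem.Chars.find rest e = -1 <;>
        simp [hb, hs, he, Int.ofNat_toNat] <;>
          split_ifs <;> simp_all <;> omega

theorem pv_find_le_of_prefix_drop (rest sub : List Char) (j : Nat) (h : sub <+: rest.drop j) :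
    0 ≤ PySem.Chars.find rest sub ∧ (PySem.Chars.find rest sub).toNat ≤ j := by
  have hin := (PySem.Chars.exists_prefix_drop_iff_isIn sub rest).mp ⟨j, h⟩
  have hnn : 0 ≤ PySem.Chars.find rest sub :=
    (PySem.Chars.find_nonneg_iff rest sub).mpr ((PySem.Chars.isIn_iff_infix sub rest).mp hin)
  refine ⟨hnn, ?_⟩
  by_contra hlt
  exact (PySem.Chars.find_spec hnn).2 j (by omega) h

theorem pv_no_prefix_of_find_neg (rest sub : List Char)
    (h : PySem.Chars.find rest sub = -1) (j : Nat) : ¬ sub <+: rest.drop j := by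
  intro hp
  exact ((PySem.Chars.find_eq_neg_one_iff rest sub).mp h)
    ((PySem.Chars.isIn_iff_infix sub rest).mp
      ((PySem.Chars.exists_prefix_drop_iff_isIn sub rest).mp ⟨j, hp⟩))

-- ¬ x-prefix before x's own first occurrence, or anywhere below another delimiter's find
theorem pv_not_prefix_ahead (rest x : List Char) (j : Nat)
    (h : PySem.Chars.find rest x = -1 ∨ (j : Int) < PySem.Chars.find rest x) :
    ¬ x <+: rest.drop j := by
  rcases h with h | h
  · exact pv_no_prefix_of_find_neg rest x h j
  · intro hp
    have h2 := pv_find_le_of_prefix_drop rest x j hp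
    omega

theorem pvBbest_some_spec (rest b s e : List Char) (p : Nat) (d : List Char) (flag : Bool)
    (h : pvBbest rest b s e = some (p, d, flag)) :
    (∀ j < p, ¬ pvMatchAt b s e (rest.drop j)) ∧ d <+: rest.drop p ∧
      (if b <+: rest.drop p then d = b ∧ flag = false
       else if s <+: rest.drop p then d = s ∧ flag = true
       else d = e ∧ flag = false) := by
  have nb := PySem.Chars.neg_one_le_find rest b
  have ns := PySem.Chars.neg_one_le_find rest s
  have ne := PySem.Chars.neg_one_le_find rest e
  rw [pvBbest_eq] at h
  have wb : ∀ (x : List Char), 0 ≤ PySem.Chars.find rest x →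
      x <+: rest.drop (PySem.Chars.find rest x).toNat :=
    fun x hx => (PySem.Chars.find_spec hx).1
  have nbp : ∀ (x : List Char) (q : Int) (j : Nat),
      (PySem.Chars.find rest x = -1 ∨ q ≤ PySem.Chars.find rest x) → (j : Int) < q →
      ¬ x <+: rest.drop j := by
    intro x q j hq hj
    apply pv_not_prefix_ahead
    rcases hq with h1 | h1
    · exact Or.inl h1
    · exact Or.inr (by omega)
  have natp : ∀ (x : List Char) (pp : Nat), x <+: rest.drop pp →
      0 ≤ PySem.Chars.find rest x ∧ (PySem.Chars.find rest x).toNat ≤ pp :=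
    fun x pp => pv_find_le_of_prefix_drop rest x pp
  split_ifs at h with h1 h2 h3 h4 h5 h6 h7 <;>
    simp only [Option.some.injEq, Prod.mk.injEq] at h <;>
      obtain ⟨rfl, rfl, rfl⟩ := h
  -- goal 1: winner e (e < s < b)
  · refine ⟨?_, wb e (by omega), ?_⟩
    · intro j hj
      rintro (hp | hp | hp)
      · exact nbp b (PySem.Chars.find rest e) j (Or.inr (by omega)) (by omega) hp
      · exact nbp s (PySem.Chars.find rest e) j (Or.inr (by omega)) (by omega) hp
      · exact nbp e (PySem.Chars.find rest e) j (Or.inr (by omega)) (by omega) hp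
    · rw [if_neg, if_neg]
      · exact ⟨rfl, rfl⟩
      · intro hp; have := natp s _ hp; omega
      · intro hp; have := natp b _ hp; omega
  -- goal 2: winner s (s < b, ¬(e < s))
  · refine ⟨?_, wb s (by omega), ?_⟩
    · intro j hj
      rintro (hp | hp | hp)
      · exact nbp b (PySem.Chars.find rest s) j (Or.inr (by omega)) (by omega) hp
      · exact nbp s (PySem.Chars.find rest s) j (Or.inr (by omega)) (by omega) hp
      · exact nbp e (PySem.Chars.find rest s) j
          (by rcases Decidable.not_and_iff_not_or_not.mp h3 with h' | h'
              · exact Or.inl (by omega)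
              · exact Or.inr (by omega)) (by omega) hp
    · rw [if_neg, if_pos (wb s (by omega))]
      · exact ⟨rfl, rfl⟩
      · intro hp; have := natp b _ hp; omega
  -- goal 3: winner e (¬(s < b), e < b)
  · refine ⟨?_, wb e (by omega), ?_⟩
    · intro j hj
      rintro (hp | hp | hp)
      · exact nbp b (PySem.Chars.find rest e) j (Or.inr (by omega)) (by omega) hp
      · exact nbp s (PySem.Chars.find rest e) j
          (by rcases Decidable.not_and_iff_not_or_not.mp h2 with h' | h'
              · exact Or.inl (by omega)
              · exact Or.inr (by omega)) (by omega) hp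
      · exact nbp e (PySem.Chars.find rest e) j (Or.inr (by omega)) (by omega) hp
    · rw [if_neg, if_neg]
      · exact ⟨rfl, rfl⟩
      · intro hp; have h9 := natp s _ hp
        rcases Decidable.not_and_iff_not_or_not.mp h2 with h' | h' <;> omega
      · intro hp; have := natp b _ hp; omega
  -- goal 4: winner b
  · refine ⟨?_, wb b (by omega), ?_⟩
    · intro j hj
      rintro (hp | hp | hp)
      · exact nbp b (PySem.Chars.find rest b) j (Or.inr (by omega)) (by omega) hp
      · exact nbp s (PySem.Chars.find rest b) j
          (by rcases Decidable.not_and_iff_not_or_not.mp h2 with h' | h'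
              · exact Or.inl (by omega)
              · exact Or.inr (by omega)) (by omega) hp
      · exact nbp e (PySem.Chars.find rest b) j
          (by rcases Decidable.not_and_iff_not_or_not.mp h4 with h' | h'
              · exact Or.inl (by omega)
              · exact Or.inr (by omega)) (by omega) hp
    · rw [if_pos (wb b (by omega))]
      exact ⟨rfl, rfl⟩
  -- goal 5: b absent, winner e (e < s)
  · refine ⟨?_, wb e (by omega), ?_⟩
    · intro j hj
      rintro (hp | hp | hp)
      · exact pv_no_prefix_of_find_neg rest b (by omega) j hp
      · exact nbp s (PySem.Chars.find rest e) j (Or.inr (by omega)) (by omega) hp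
      · exact nbp e (PySem.Chars.find rest e) j (Or.inr (by omega)) (by omega) hp
    · rw [if_neg, if_neg]
      · exact ⟨rfl, rfl⟩
      · intro hp; have := natp s _ hp; omega
      · exact pv_no_prefix_of_find_neg rest b (by omega) _
  -- goal 6: b absent, winner s
  · refine ⟨?_, wb s (by omega), ?_⟩
    · intro j hj
      rintro (hp | hp | hp)
      · exact pv_no_prefix_of_find_neg rest b (by omega) j hp
      · exact nbp s (PySem.Chars.find rest s) j (Or.inr (by omega)) (by omega) hp
      · exact nbp e (PySem.Chars.find rest s) j
          (by rcases Decidable.not_and_iff_not_or_not.mp h6 with h' | h'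
              · exact Or.inl (by omega)
              · exact Or.inr (by omega)) (by omega) hp
    · rw [if_neg, if_pos (wb s (by omega))]
      · exact ⟨rfl, rfl⟩
      · exact pv_no_prefix_of_find_neg rest b (by omega) _
  -- goal 7: b, s absent, winner e
  · refine ⟨?_, wb e (by omega), ?_⟩
    · intro j hj
      rintro (hp | hp | hp)
      · exact pv_no_prefix_of_find_neg rest b (by omega) j hp
      · exact pv_no_prefix_of_find_neg rest s (by omega) j hp
      · exact nbp e (PySem.Chars.find rest e) j (Or.inr (by omega)) (by omega) hp
    · rw [if_neg, if_neg]
      · exact ⟨rfl, rfl⟩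
      · exact pv_no_prefix_of_find_neg rest s (by omega) _
      · exact pv_no_prefix_of_find_neg rest b (by omega) _


theorem pvAclear_eq_emit (st : Nat) (buf : List Char) (out : List String) :
    pvAclear st buf out = pvBemit out (st == 2) buf := by
  unfold pvAclear pvBemit
  by_cases h : st = 2 <;> simp [h]

theorem pvAloop_nil (lb ls le : List Char) (out : List String) (buf : List Char) (st f : Nat) :
    pvAloop lb ls le out buf st [] f = pvAclear st buf out := by
  cases f <;> simp [pvAloop]

theorem pvAloop_run (lb ls le : List Char) (p : Nat) :
    ∀ (rest : List Char) (out : List String) (buf : List Char) (st fuel : Nat),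
      (∀ j < p, ¬ pvMatchAt lb ls le (rest.drop j)) → p ≤ rest.length → p ≤ fuel →
      pvAloop lb ls le out buf st rest fuel =
        pvAloop lb ls le out (buf ++ rest.take p) st (rest.drop p) (fuel - p) := by
  induction p with
  | zero => intro rest out buf st fuel _ _ _; simp
  | succ q ih =>
    intro rest out buf st fuel hm hlen hfuel
    cases rest with
    | nil => simp at hlen
    | cons c r =>
      cases fuel with
      | zero => omega
      | succ f =>
        have h0 := hm 0 (Nat.succ_pos q)
        simp only [List.drop_zero] at h0
        have hb : ¬ ((c :: r).take lb.length = lb) := by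
          intro hh; exact h0 (Or.inl (List.prefix_iff_eq_take.mpr hh.symm))
        have hs : ¬ ((c :: r).take ls.length = ls) := by
          intro hh; exact h0 (Or.inr (Or.inl (List.prefix_iff_eq_take.mpr hh.symm)))
        have he : ¬ ((c :: r).take le.length = le) := by
          intro hh; exact h0 (Or.inr (Or.inr (List.prefix_iff_eq_take.mpr hh.symm)))
        rw [show pvAloop lb ls le out buf st (c :: r) (f+1)
              = pvAloop lb ls le out (buf ++ [c]) st r f by
            simp only [pvAloop]; rw [if_neg hb, if_neg hs, if_neg he]]
        rw [ih r out (buf ++ [c]) st f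
            (fun j hj => by have := hm (j+1) (by omega); simpa using this)
            (by simpa using hlen) (by omega)]
        simp

theorem pv_main (lb ls le : List Char) (hb : lb ≠ []) (hs : ls ≠ []) (he : le ≠ []) :
    ∀ (fuelB : Nat) (rest : List Char) (out : List String) (st fuelA : Nat),
      rest.length ≤ fuelA → rest.length < fuelB →
      pvAloop lb ls le out [] st rest fuelA = pvBloop lb ls le out (st == 2) rest fuelB := by
  intro fuelB
  induction fuelB with
  | zero => intro rest out st fuelA _ h; omega
  | succ fb ih =>
    intro rest out st fuelA hA hB
    cases hbest : pvBbest rest lb ls le with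
    | none =>
      have hnom := pvBbest_none_iff rest lb ls le |>.mp hbest
      have hrun := pvAloop_run lb ls le rest.length rest out [] st fuelA
        (fun j _ => by
          rintro (hp | hp | hp)
          · exact pv_no_prefix_of_find_neg rest lb hnom.1 j hp
          · exact pv_no_prefix_of_find_neg rest ls hnom.2.1 j hp
          · exact pv_no_prefix_of_find_neg rest le hnom.2.2 j hp)
        le_rfl hA
      rw [hrun]
      simp only [List.take_length, List.drop_length, List.nil_append]
      rw [pvAloop_nil, pvAclear_eq_emit]
      simp [pvBloop, hbest]
    | some pdf =>
      obtain ⟨p, d, flag⟩ := pdf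
      obtain ⟨hF1, hF3, hF2⟩ := pvBbest_some_spec rest lb ls le p d flag hbest
      have hdne : d ≠ [] := by
        split_ifs at hF2 with h1 h2
        · exact hF2.1 ▸ hb
        · exact hF2.1 ▸ hs
        · exact hF2.1 ▸ he
      have hplen : p < rest.length := by
        by_contra hc
        rw [List.drop_eq_nil_of_le (by omega)] at hF3
        exact hdne (List.prefix_nil.mp hF3)
      have hdlen : d.length ≤ rest.length - p := by
        have := hF3.length_le
        simp at this; omega
      have hdpos : 0 < d.length := List.length_pos_of_ne_nil hdne
      rw [pvAloop_run lb ls le p rest out [] st fuelA hF1 (by omega) (by omega)]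
      -- the suffix where the winning delimiter matches
      obtain ⟨f', hf'⟩ : ∃ f', fuelA - p = f' + 1 := ⟨fuelA - p - 1, by omega⟩
      rw [hf']
      have hrest' : rest.drop p ≠ [] := by
        intro hc; rw [hc] at hF3; exact hdne (List.prefix_nil.mp hF3)
      obtain ⟨c, rtl, hcr⟩ := List.exists_cons_of_ne_nil hrest'
      -- B side one step
      rw [show pvBloop lb ls le out (st == 2) rest (fb+1)
            = pvBloop lb ls le (pvBemit out (st == 2) (rest.take p) ++ [String.ofList d]) flag
                (rest.drop (p + d.length)) fb by simp [pvBloop, hbest]]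
      split_ifs at hF2 with hp1 hp2
      · -- winner is begin
        obtain ⟨rfl, rfl⟩ := hF2
        rw [show pvAloop d ls le out ([] ++ rest.take p) st (rest.drop p) (f'+1)
              = pvAloop d ls le (pvAclear st (rest.take p) out ++ [String.ofList d]) [] 1
                  ((rest.drop p).drop d.length) f' by
            rw [hcr]; simp only [pvAloop, List.nil_append]
            rw [if_pos (by rw [← hcr]; exact (List.prefix_iff_eq_take.mp hp1).symm)]]
        rw [ih _ _ _ _ (by simp; omega) (by simp; omega)]
        rw [pvAclear_eq_emit, List.drop_drop]
        rfl
      · -- winner is sep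
        obtain ⟨rfl, rfl⟩ := hF2
        rw [show pvAloop lb d le out ([] ++ rest.take p) st (rest.drop p) (f'+1)
              = pvAloop lb d le (pvAclear st (rest.take p) out ++ [String.ofList d]) [] 2
                  ((rest.drop p).drop d.length) f' by
            rw [hcr]; simp only [pvAloop, List.nil_append]
            rw [if_neg (fun hh => hp1 (by rw [← hcr] at hh; exact List.prefix_iff_eq_take.mpr hh.symm)),
               if_pos (by rw [← hcr]; exact (List.prefix_iff_eq_take.mp hp2).symm)]]
        rw [ih _ _ _ _ (by simp; omega) (by simp; omega)]
        rw [pvAclear_eq_emit, List.drop_drop]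
        rfl
      · -- winner is end
        obtain ⟨rfl, rfl⟩ := hF2
        have hep : d <+: rest.drop p := hF3
        rw [show pvAloop lb ls d out ([] ++ rest.take p) st (rest.drop p) (f'+1)
              = pvAloop lb ls d (pvAclear st (rest.take p) out ++ [String.ofList d]) [] 0
                  ((rest.drop p).drop d.length) f' by
            rw [hcr]; simp only [pvAloop, List.nil_append]
            rw [if_neg (fun hh => hp1 (by rw [← hcr] at hh; exact List.prefix_iff_eq_take.mpr hh.symm)),
               if_neg (fun hh => hp2 (by rw [← hcr] at hh; exact List.prefix_iff_eq_take.mpr hh.symm)),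
               if_pos (by rw [← hcr]; exact (List.prefix_iff_eq_take.mp hep).symm)]]
        rw [ih _ _ _ _ (by simp; omega) (by simp; omega)]
        rw [pvAclear_eq_emit, List.drop_drop]
        rfl

-- ===== VERDICT (by name: the statement is the Claim_ definition above) =====
theorem text2text_list_spec : Claim_equal_text2text_list := by
  intro text begin sep end_ _hdom hpre
  obtain ⟨hb, hs, he⟩ := hpre
  unfold Spec_text2text_list text2text_list text2text_list_alt
  have tl : ∀ s : String, s ≠ "" → s.toList ≠ [] := by
    intro s h hc
    exact h (by simpa using congrArg String.ofList hc)
  exact pv_main _ _ _ (tl _ hb) (tl _ hs) (tl _ he) _ _ _ 0 _ le_rfl (Nat.lt_succ_self _)
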